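-- pv_equiv track=rewrite | github.com/lGodHatesMel/GHM-Discord-Bot | utils/utils.py | FormatedSetDetails
-- ===== SOURCE A (Python) =====
-- def FormatedSetDetails(SetDetails):
--     splittables = [
--         "Ability:", "EVs:", "IVs:", "Shiny:", "Gigantamax:", "Ball:", "- ", "Level:",
--         "Happiness:", "Language:", "OT:", "OTGender:", "TID:", "SID:", "Alpha:", "Tera Type:",
--         "Adamant Nature", "Bashful Nature", "Brave Nature", "Bold Nature", "Calm Nature",
--         "Careful Nature", "Docile Nature", "Gentle Nature", "Hardy Nature", "Hasty Nature",
--         "Impish Nature", "Jolly Nature", "Lax Nature", "Lonely Nature", "Mild Nature",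
--         "Modest Nature", "Naive Nature", "Naughty Nature", "Quiet Nature", "Quirky Nature",
--         "Rash Nature", "Relaxed Nature", "Sassy Nature", "Serious Nature", "Timid Nature",
--         "*",
--     ]
--     for i in splittables:
--         if i in SetDetails:
--             SetDetails = SetDetails.replace(i, f"\n{i}")
--     return SetDetails
-- ===== SOURCE B (Python) =====
-- NATURES = [
--     "Adamant", "Bashful", "Brave", "Bold", "Calm", "Careful", "Docile",
--     "Gentle", "Hardy", "Hasty", "Impish", "Jolly", "Lax", "Lonely", "Mild",
--     "Modest", "Naive", "Naughty", "Quiet", "Quirky", "Rash", "Relaxed",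
--     "Sassy", "Serious", "Timid",
-- ]
--
-- FIELD_TOKENS = [
--     "Ability:", "EVs:", "IVs:", "Shiny:", "Gigantamax:", "Ball:", "- ",
--     "Level:", "Happiness:", "Language:", "OT:", "OTGender:", "TID:", "SID:",
--     "Alpha:", "Tera Type:",
-- ]
--
-- TOKENS = FIELD_TOKENS + [n + " Nature" for n in NATURES] + ["*"]
--
--
-- def FormatedSetDetails(SetDetails):
--     # Single left-to-right scan: at each position emit "\n" + token if one of the
--     # keyword tokens starts here (then jump over it), else copy the character.
--     # Correct because no token overlaps another (no nonempty suffix of one is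
--     # prefix-comparable with another, none is a prefix of another) and tokens
--     # contain no newline, so one scan equals A's 42 sequential replace passes.
--     out = []
--     i = 0
--     n = len(SetDetails)
--     while i < n:
--         for token in TOKENS:
--             if SetDetails.startswith(token, i):
--                 out.append("\n")
--                 out.append(token)
--                 i += len(token)
--                 break
--         else:
--             out.append(SetDetails[i])
--             i += 1
--     return "".join(out)
-- ===== Notes on version B (the rewrite author's own statement) =====
-- stated objective: alternative
-- what changed: Replaces the 42 sequential full-string replace passes with one left-to-right scan that matches all tokens at each position and jumps over a match (valid because no token overlaps or prefixes another); the 25 'X Nature' tokens are generated from a nature-name list instead of being listed literally.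
import Mathlib
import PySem

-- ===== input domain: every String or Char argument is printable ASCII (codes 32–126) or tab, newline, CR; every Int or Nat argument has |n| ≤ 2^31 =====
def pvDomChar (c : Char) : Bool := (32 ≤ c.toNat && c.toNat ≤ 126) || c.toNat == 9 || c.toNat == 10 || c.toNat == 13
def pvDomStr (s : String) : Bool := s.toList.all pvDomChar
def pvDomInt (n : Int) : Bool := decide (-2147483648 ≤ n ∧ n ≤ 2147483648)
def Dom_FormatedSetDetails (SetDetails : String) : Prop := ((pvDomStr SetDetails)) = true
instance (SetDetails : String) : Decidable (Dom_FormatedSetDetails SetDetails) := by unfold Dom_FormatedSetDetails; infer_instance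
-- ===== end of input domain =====

-- B replaces A's 42 sequential full-string replace passes by one left-to-right scan
-- over the string, with the 25 nature tokens generated from a nature-name list
-- (objective: alternative).


-- ===== PORT A =====
def splittables : List String :=
  ["Ability:", "EVs:", "IVs:", "Shiny:", "Gigantamax:", "Ball:", "- ", "Level:",
   "Happiness:", "Language:", "OT:", "OTGender:", "TID:", "SID:", "Alpha:", "Tera Type:",
   "Adamant Nature", "Bashful Nature", "Brave Nature", "Bold Nature", "Calm Nature",
   "Careful Nature", "Docile Nature", "Gentle Nature", "Hardy Nature", "Hasty Nature",
   "Impish Nature", "Jolly Nature", "Lax Nature", "Lonely Nature", "Mild Nature",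
   "Modest Nature", "Naive Nature", "Naughty Nature", "Quiet Nature", "Quirky Nature",
   "Rash Nature", "Relaxed Nature", "Sassy Nature", "Serious Nature", "Timid Nature",
   "*"]

def FormatedSetDetails (SetDetails : String) : String :=
  splittables.foldl
    (fun s i => if PySem.Str.isIn i s then PySem.Str.replace s i ("\n" ++ i) else s)
    SetDetails

-- ===== PORT B =====
def naturesB : List String :=
  ["Adamant", "Bashful", "Brave", "Bold", "Calm", "Careful", "Docile",
   "Gentle", "Hardy", "Hasty", "Impish", "Jolly", "Lax", "Lonely", "Mild",
   "Modest", "Naive", "Naughty", "Quiet", "Quirky", "Rash", "Relaxed",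
   "Sassy", "Serious", "Timid"]

def fieldTokensB : List String :=
  ["Ability:", "EVs:", "IVs:", "Shiny:", "Gigantamax:", "Ball:", "- ",
   "Level:", "Happiness:", "Language:", "OT:", "OTGender:", "TID:", "SID:",
   "Alpha:", "Tera Type:"]

def tokensB : List (List Char) :=
  fieldTokensB.map String.toList
    ++ naturesB.map (fun n => (n ++ " Nature").toList)
    ++ [['*']]

-- the while-loop of B: fuel counts down (one call per loop iteration), always run
-- with fuel = remaining length; the fuel-0 and empty-token branches are totality
-- guards only, never reached with B's token list.
def scanGo (ts : List (List Char)) : Nat → List Char → List Char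
  | _, [] => []
  | 0, s => s
  | fuel + 1, c :: rest =>
    match ts.find? (fun t => t.isPrefixOf (c :: rest)) with
    | some t =>
      if t.isEmpty then c :: scanGo ts fuel rest
      else '\n' :: (t ++ scanGo ts fuel ((c :: rest).drop t.length))
    | none => c :: scanGo ts fuel rest

def FormatedSetDetails_alt (SetDetails : String) : String :=
  String.ofList (scanGo tokensB SetDetails.toList.length SetDetails.toList)

-- ===== PRECONDITION & SPEC =====
def Spec_FormatedSetDetails (SetDetails : String) (out : String) : Prop := out = FormatedSetDetails_alt SetDetails
instance (SetDetails : String) (out : String) : Decidable (Spec_FormatedSetDetails SetDetails out) := by unfold Spec_FormatedSetDetails; infer_instance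

-- ===== CLAIM (what is proved, stated in full; the proofs are below) =====
def Claim_equal_FormatedSetDetails : Prop := ∀ (SetDetails : String), Dom_FormatedSetDetails SetDetails → Spec_FormatedSetDetails SetDetails (FormatedSetDetails SetDetails)

-- ===== LEMMAS AND PROOFS =====

-- scan with the exact fuel B's wrapper uses
def scan (ts : List (List Char)) (s : List Char) : List Char := scanGo ts s.length s

-- A's one-token step, on the char-list side
def stepA (u t : List Char) : List Char :=
  if PySem.Chars.isIn t u then PySem.Chars.replace u t ('\n' :: t) else u

-- the token list is usable by the scan: distinct, nonempty, newline-free tokens,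
-- no token a prefix of another, and no nonempty proper suffix of one
-- prefix-comparable with another (so occurrences of two tokens never overlap)
def good (ts : List (List Char)) : Prop :=
  ts.Nodup ∧
  (∀ t ∈ ts, t ≠ [] ∧ '\n' ∉ t) ∧
  (∀ t1 ∈ ts, ∀ t2 ∈ ts,
    (t1 ≠ t2 → ¬ t1 <+: t2) ∧
    (∀ k ∈ List.range t1.length, k ≠ 0 → ¬ t2 <+: t1.drop k ∧ ¬ t1.drop k <+: t2))

lemma isPrefixOf_eq_decide (a b : List Char) : a.isPrefixOf b = decide (a <+: b) := by
  by_cases h : a <+: b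
  · simp [h, List.isPrefixOf_iff_prefix]
  · simp only [h, decide_false]
    rw [← Bool.not_eq_true, List.isPrefixOf_iff_prefix]
    exact h

lemma scanGo_irrel (ts : List (List Char)) :
    ∀ m n s, s.length ≤ m → s.length ≤ n → scanGo ts m s = scanGo ts n s := by
  intro m
  induction m with
  | zero =>
    intro n s hm _
    have hs : s = [] := List.eq_nil_of_length_eq_zero (Nat.le_zero.mp hm)
    subst hs; cases n <;> rfl
  | succ m ih =>
    intro n s hm hn
    cases s with
    | nil => cases n <;> rfl
    | cons c rest =>
      cases n with
      | zero => simp at hn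
      | succ n' =>
        cases hf : List.find? (fun t => t.isPrefixOf (c :: rest)) ts with
        | none =>
          simp only [scanGo, hf]
          rw [ih n' rest (by simpa using hm) (by simpa using hn)]
        | some t =>
          simp only [scanGo, hf]
          by_cases he : t.isEmpty
          · rw [if_pos he, if_pos he, ih n' rest (by simpa using hm) (by simpa using hn)]
          · have hp : t <+: c :: rest := by
              simpa [List.isPrefixOf_iff_prefix] using List.find?_some hf
            have ht1 : 1 ≤ t.length := by
              cases t with
              | nil => simp at he
              | cons _ _ => simp
            rw [if_neg he, if_neg he,
              ih n' ((c :: rest).drop t.length)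
                (by simp only [List.length_drop, List.length_cons] at *; omega)
                (by simp only [List.length_drop, List.length_cons] at *; omega)]

lemma scan_nil (ts : List (List Char)) : scan ts [] = [] := rfl

lemma scan_cons_match (ts : List (List Char)) (c : Char) (rest t : List Char)
    (hf : ts.find? (fun t => t.isPrefixOf (c :: rest)) = some t) (ht : t ≠ []) :
    scan ts (c :: rest) = '\n' :: (t ++ scan ts ((c :: rest).drop t.length)) := by
  have hp : t <+: c :: rest := by
    simpa [List.isPrefixOf_iff_prefix] using List.find?_some hf
  have ht1 : 1 ≤ t.length := by cases t with | nil => exact absurd rfl ht | cons _ _ => simp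
  have hle : t.length ≤ rest.length + 1 := by simpa using hp.length_le
  unfold scan
  simp only [List.length_cons, scanGo, hf]
  rw [if_neg (by simpa [List.isEmpty_iff] using ht)]
  congr 2
  exact scanGo_irrel ts rest.length _ _
    (by simp only [List.length_drop, List.length_cons]; omega) le_rfl

lemma scan_cons_none (ts : List (List Char)) (c : Char) (rest : List Char)
    (hf : ts.find? (fun t => t.isPrefixOf (c :: rest)) = none) :
    scan ts (c :: rest) = c :: scan ts rest := by
  unfold scan
  simp only [List.length_cons, scanGo, hf]

lemma scan_no_tokens : ∀ u, scan [] u = u := by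
  intro u
  induction u with
  | nil => rfl
  | cons c rest ih => rw [scan_cons_none [] c rest rfl, ih]

lemma prefix_or (a b Y : List Char) (h : a <+: b ++ Y) : a <+: b ∨ b <+: a :=
  List.prefix_or_prefix_of_prefix h (List.prefix_append b Y)

lemma not_prefix_append (a b Y : List Char) (h1 : ¬ a <+: b) (h2 : ¬ b <+: a) :
    ¬ a <+: b ++ Y := fun h => (prefix_or a b Y h).elim h1 h2

lemma prefix_append_iff_of (a b Y : List Char) (h2 : ¬ b <+: a) :
    a <+: b ++ Y ↔ a <+: b := by
  constructor
  · intro h; exact (prefix_or a b Y h).elim id (fun h' => absurd h' h2)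
  · intro h; exact h.trans (List.prefix_append b Y)

lemma find?_congr' (l : List (List Char)) (p q : List Char → Bool)
    (h : ∀ a ∈ l, p a = q a) : l.find? p = l.find? q := by
  induction l with
  | nil => rfl
  | cons x xs ih =>
    simp only [List.find?]; rw [h x (by simp)]
    cases hq : q x <;> simp [ih (fun a ha => h a (by simp [ha]))]

lemma prefixPass (ts : List (List Char)) (p Y : List Char)
    (h : ∀ k < p.length, ∀ t2 ∈ ts, ¬ t2 <+: (p.drop k ++ Y)) :
    scan ts (p ++ Y) = p ++ scan ts Y := by
  induction p with
  | nil => rfl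
  | cons c p' ih =>
    have hf : ts.find? (fun t => t.isPrefixOf (c :: (p' ++ Y))) = none := by
      apply List.find?_eq_none.mpr
      intro t2 ht2
      simpa [List.isPrefixOf_iff_prefix] using h 0 (by simp) t2 ht2
    rw [List.cons_append, scan_cons_none ts c (p' ++ Y) hf,
      ih (fun k hk t2 ht2 => by simpa using h (k + 1) (by simpa using hk) t2 ht2)]
    rfl

lemma replace_go_spec (t : List Char) (ht : t ≠ []) :
    ∀ fuel u acc, u.length ≤ fuel →
      PySem.Chars.replace.go t ('\n' :: t) fuel u acc = acc.reverse ++ scan [t] u := by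
  intro fuel
  induction fuel with
  | zero =>
    intro u acc h
    have hu : u = [] := List.eq_nil_of_length_eq_zero (Nat.le_zero.mp h)
    subst hu
    simp only [PySem.Chars.replace.go, scan_nil, List.append_nil]
  | succ n ih =>
    intro u acc h
    cases u with
    | nil => simp only [PySem.Chars.replace.go, scan_nil, List.append_nil]
    | cons c rest =>
      have ht1 : 1 ≤ t.length := by cases t with | nil => exact absurd rfl ht | cons _ _ => simp
      simp only [PySem.Chars.replace.go]
      by_cases hp : t.isPrefixOf (c :: rest)
      · rw [if_pos hp,
          ih ((c :: rest).drop t.length) _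
            (by simp only [List.length_drop, List.length_cons] at *; omega),
          scan_cons_match [t] c rest t (by simp [List.find?, hp]) ht]
        simp
      · rw [if_neg hp, ih rest (c :: acc) (by simpa using h),
          scan_cons_none [t] c rest (by simp [List.find?, hp])]
        simp

lemma replace_eq_scan (t u : List Char) (ht : t ≠ []) :
    PySem.Chars.replace u t ('\n' :: t) = scan [t] u := by
  unfold PySem.Chars.replace
  rw [if_neg (by simpa [List.isEmpty_iff] using ht),
    replace_go_spec t ht u.length u [] le_rfl]
  simp

lemma scan_id_of_no_occ (t : List Char) :
    ∀ v, (∀ j, ¬ t <+: v.drop j) → scan [t] v = v := by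
  intro v
  induction v with
  | nil => intro _; rfl
  | cons c rest ih =>
    intro hv
    rw [scan_cons_none [t] c rest
        (by simp only [List.find?]
            rw [show t.isPrefixOf (c :: rest) = false by
              simpa [isPrefixOf_eq_decide] using hv 0]),
      ih (fun j => by simpa using hv (j + 1))]

lemma scan_id_of_not_isIn (t u : List Char) (h : PySem.Chars.isIn t u = false) :
    scan [t] u = u := by
  apply scan_id_of_no_occ
  intro j hj
  have : PySem.Chars.isIn t u = true := (PySem.Chars.exists_prefix_drop_iff_isIn t u).mp ⟨j, hj⟩
  simp [h] at this

lemma stepA_eq_scan (t u : List Char) (ht : t ≠ []) : stepA u t = scan [t] u := by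
  unfold stepA
  cases h : PySem.Chars.isIn t u with
  | true => rw [if_pos rfl, replace_eq_scan t u ht]
  | false => rw [if_neg (by simp), scan_id_of_not_isIn t u h]

lemma not_prefix_nl (t2 X : List Char) (hne : t2 ≠ []) (hnl : '\n' ∉ t2) :
    ¬ t2 <+: ('\n' :: X) := by
  cases t2 with
  | nil => exact absurd rfl hne
  | cons d t2' =>
    intro h
    rw [List.cons_prefix_cons] at h
    exact hnl (by simp [h.1])

lemma L3 (t : List Char) (htne : t ≠ []) :
    ∀ u t2, '\n' ∉ t2 → ¬ t2 <+: u → ¬ t2 <+: scan [t] u := by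
  intro u
  induction u with
  | nil => intro t2 _ hp; simpa [scan_nil] using hp
  | cons c rest ih =>
    intro t2 hnl hp
    have hne2 : t2 ≠ [] := by
      intro h; subst h; exact hp (List.nil_prefix)
    by_cases hpt : t.isPrefixOf (c :: rest)
    · rw [scan_cons_match [t] c rest t (by simp [List.find?, hpt]) htne]
      exact not_prefix_nl t2 _ hne2 hnl
    · rw [scan_cons_none [t] c rest (by simp [List.find?, hpt])]
      cases t2 with
      | nil => exact absurd rfl hne2
      | cons d t2' =>
        intro hcon
        rw [List.cons_prefix_cons] at hcon
        obtain ⟨rfl, h2⟩ := hcon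
        exact ih t2' (fun hm => hnl (by simp [hm]))
          (fun hh => hp (List.cons_prefix_cons.mpr ⟨rfl, hh⟩)) h2

lemma good_tail (t : List Char) (ts : List (List Char)) (h : good (t :: ts)) : good ts := by
  obtain ⟨h1, h2, h3⟩ := h
  exact ⟨h1.of_cons,
    fun t' ht' => h2 t' (List.mem_cons_of_mem _ ht'),
    fun t1 h1' t2 h2' => h3 t1 (List.mem_cons_of_mem _ h1') t2 (List.mem_cons_of_mem _ h2')⟩

lemma ML (t : List Char) (ts : List (List Char)) (hg : good (t :: ts)) :
    ∀ n u, u.length ≤ n → scan ts (scan [t] u) = scan (t :: ts) u := by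
  obtain ⟨hnd, hok, hpair⟩ := hg
  have htne : t ≠ [] := (hok t (by simp)).1
  have htnl : '\n' ∉ t := (hok t (by simp)).2
  have htmem : t ∉ ts := (List.nodup_cons.mp hnd).1
  -- the two no-overlap facts, packaged: a token never matches inside/astride another
  have hnov : ∀ t1, t1 ∈ t :: ts → ∀ t2, t2 ∈ t :: ts → t1 ≠ t2 →
      ∀ (Y : List Char) k, k < t1.length → ¬ t2 <+: (t1.drop k ++ Y) := by
    intro t1 h1 t2 h2 hne Y k hk
    by_cases hk0 : k = 0
    · subst hk0
      simp only [List.drop_zero]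
      exact not_prefix_append t2 t1 Y
        ((hpair t2 h2 t1 h1).1 (fun h => hne h.symm))
        ((hpair t1 h1 t2 h2).1 hne)
    · obtain ⟨ha, hb⟩ := (hpair t1 h1 t2 h2).2 k (List.mem_range.mpr hk) hk0
      exact not_prefix_append t2 (t1.drop k) Y ha hb
  have hself : ∀ t1, t1 ∈ t :: ts → ∀ (Y : List Char) k, 0 < k → k < t1.length →
      ¬ t1 <+: (t1.drop k ++ Y) := by
    intro t1 h1 Y k hk0 hk
    obtain ⟨ha, hb⟩ := (hpair t1 h1 t1 h1).2 k (List.mem_range.mpr hk) (Nat.pos_iff_ne_zero.mp hk0)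
    exact not_prefix_append t1 (t1.drop k) Y ha hb
  intro n
  induction n with
  | zero =>
    intro u hu
    have hu0 : u = [] := List.eq_nil_of_length_eq_zero (Nat.le_zero.mp hu)
    subst hu0; simp [scan_nil]
  | succ n ih =>
    intro u hu
    cases u with
    | nil => simp [scan_nil]
    | cons c rest =>
      by_cases hp : t <+: (c :: rest)
      · -- t matches at the head
        have ht1 : 1 ≤ t.length := by
          cases t with | nil => exact absurd rfl htne | cons _ _ => simp
        rw [scan_cons_match [t] c rest t
            (by simp [List.find?, List.isPrefixOf_iff_prefix.mpr hp]) htne]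
        rw [scan_cons_none ts '\n' (t ++ scan [t] ((c :: rest).drop t.length))
            (by apply List.find?_eq_none.mpr
                intro t2 ht2
                simpa [isPrefixOf_eq_decide] using
                  not_prefix_nl t2 _ (hok t2 (List.mem_cons_of_mem _ ht2)).1
                    (hok t2 (List.mem_cons_of_mem _ ht2)).2)]
        rw [prefixPass ts t (scan [t] ((c :: rest).drop t.length))
            (by intro k hk t2 ht2
                by_cases hk0 : k = 0
                · subst hk0
                  simp only [List.drop_zero]
                  refine not_prefix_append t2 t _ ?_ ?_
                  · exact (hpair t2 (List.mem_cons_of_mem _ ht2) t (by simp)).1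
                      (fun h => htmem (h ▸ ht2))
                  · exact (hpair t (by simp) t2 (List.mem_cons_of_mem _ ht2)).1
                      (fun h => htmem (h ▸ ht2))
                · exact hnov t (by simp) t2 (List.mem_cons_of_mem _ ht2)
                    (fun h => htmem (h ▸ ht2)) _ k hk)]
        rw [ih ((c :: rest).drop t.length)
            (by simp only [List.length_drop, List.length_cons] at *; omega)]
        rw [scan_cons_match (t :: ts) c rest t
            (by simp [List.find?, List.isPrefixOf_iff_prefix.mpr hp]) htne]
      · cases hfind : List.find? (fun t' => t'.isPrefixOf (c :: rest)) ts with
        | some t2 =>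
          -- a token of ts matches at the head (t does not)
          have hp2 : t2 <+: c :: rest := by
            simpa [List.isPrefixOf_iff_prefix] using List.find?_some hfind
          have ht2mem : t2 ∈ ts := List.mem_of_find?_eq_some hfind
          have ht2ne : t2 ≠ [] := (hok t2 (List.mem_cons_of_mem _ ht2mem)).1
          have htne2 : t ≠ t2 := fun h => htmem (h ▸ ht2mem)
          have ht21 : 1 ≤ t2.length := by
            cases t2 with | nil => exact absurd rfl ht2ne | cons _ _ => simp
          have hsplit : t2 ++ (c :: rest).drop t2.length = c :: rest :=
            List.prefix_iff_eq_append.mp hp2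
          have e1 : scan [t] (c :: rest) = t2 ++ scan [t] ((c :: rest).drop t2.length) := by
            conv_lhs => rw [← hsplit]
            apply prefixPass [t] t2 ((c :: rest).drop t2.length)
            intro k hk t1 ht1
            have ht1t : t1 = t := by simpa using ht1
            subst ht1t
            exact hnov t2 (List.mem_cons_of_mem _ ht2mem) t1 (by simp) htne2.symm _ k hk
          rw [e1]
          have e2 : List.find?
              (fun t' => t'.isPrefixOf (t2 ++ scan [t] ((c :: rest).drop t2.length))) ts
              = some t2 := by
            rw [find?_congr' ts _ (fun t' => t'.isPrefixOf (t2 ++ (c :: rest).drop t2.length))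
              (by intro t3 ht3
                  by_cases h32 : t3 = t2
                  · subst h32
                    simp [isPrefixOf_eq_decide, List.prefix_append]
                  · have hn23 : ¬ t2 <+: t3 :=
                      (hpair t2 (List.mem_cons_of_mem _ ht2mem) t3
                        (List.mem_cons_of_mem _ ht3)).1 (fun h => h32 (h.symm ▸ rfl))
                    simp only [isPrefixOf_eq_decide]
                    exact decide_eq_decide.mpr (by
                      rw [prefix_append_iff_of _ _ _ hn23,
                        prefix_append_iff_of _ _ _ hn23]))]
            rw [hsplit]
            exact hfind
          cases t2 with
          | nil => exact absurd rfl ht2ne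
          | cons d2 r2 =>
            rw [show (d2 :: r2) ++ scan [t] ((c :: rest).drop (d2 :: r2).length)
                  = d2 :: (r2 ++ scan [t] ((c :: rest).drop (d2 :: r2).length)) from rfl]
            rw [scan_cons_match ts d2 (r2 ++ scan [t] ((c :: rest).drop (d2 :: r2).length))
              (d2 :: r2) (by simpa using e2) ht2ne]
            rw [show ((d2 :: (r2 ++ scan [t] ((c :: rest).drop (d2 :: r2).length))).drop
                  (d2 :: r2).length)
                = scan [t] ((c :: rest).drop (d2 :: r2).length) from by simp]
            rw [ih ((c :: rest).drop (d2 :: r2).length)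
              (by simp only [List.length_drop, List.length_cons] at *
                  simp at ht21; omega)]
            rw [scan_cons_match (t :: ts) c rest (d2 :: r2)
              (by simp only [List.find?, isPrefixOf_eq_decide, hp, decide_false]
                  simpa [isPrefixOf_eq_decide] using hfind) ht2ne]
        | none =>
          -- no token matches at the head
          have hf1 : List.find? (fun t' => t'.isPrefixOf (c :: rest)) [t] = none := by
            simp [List.find?, isPrefixOf_eq_decide, hp]
          rw [scan_cons_none [t] c rest hf1]
          have hscan : scan [t] (c :: rest) = c :: scan [t] rest := scan_cons_none [t] c rest hf1
          rw [scan_cons_none ts c (scan [t] rest)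
            (by apply List.find?_eq_none.mpr
                intro t3 ht3
                have h3 : ¬ t3 <+: c :: rest := by
                  have := List.find?_eq_none.mp hfind t3 ht3
                  simpa [isPrefixOf_eq_decide] using this
                have := L3 t htne (c :: rest) t3
                  (hok t3 (List.mem_cons_of_mem _ ht3)).2 h3
                rw [hscan] at this
                simpa [isPrefixOf_eq_decide] using this)]
          rw [ih rest (by simpa using Nat.le_of_succ_le_succ (by simpa using hu))]
          rw [scan_cons_none (t :: ts) c rest
            (by simp only [List.find?, isPrefixOf_eq_decide, hp, decide_false]
                simpa [isPrefixOf_eq_decide] using hfind)]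

lemma chain : ∀ ts, good ts → ∀ u, ts.foldl stepA u = scan ts u := by
  intro ts
  induction ts with
  | nil => intro _ u; exact (scan_no_tokens u).symm
  | cons t ts ih =>
    intro hg u
    have htne : t ≠ [] := (hg.2.1 t (by simp)).1
    simp only [List.foldl_cons]
    rw [ih (good_tail t ts hg) (stepA u t), stepA_eq_scan t u htne,
      ML t ts hg (u.length) u le_rfl]

-- the token data over Nat char codes: all heavy computation is done on Nat
-- lists (cheap to evaluate), then transferred to the char level by injectivity
def tokensN : List (List Nat) :=
  [[65, 98, 105, 108, 105, 116, 121, 58],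
   [69, 86, 115, 58],
   [73, 86, 115, 58],
   [83, 104, 105, 110, 121, 58],
   [71, 105, 103, 97, 110, 116, 97, 109, 97, 120, 58],
   [66, 97, 108, 108, 58],
   [45, 32],
   [76, 101, 118, 101, 108, 58],
   [72, 97, 112, 112, 105, 110, 101, 115, 115, 58],
   [76, 97, 110, 103, 117, 97, 103, 101, 58],
   [79, 84, 58],
   [79, 84, 71, 101, 110, 100, 101, 114, 58],
   [84, 73, 68, 58],
   [83, 73, 68, 58],
   [65, 108, 112, 104, 97, 58],
   [84, 101, 114, 97, 32, 84, 121, 112, 101, 58],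
   [65, 100, 97, 109, 97, 110, 116, 32, 78, 97, 116, 117, 114, 101],
   [66, 97, 115, 104, 102, 117, 108, 32, 78, 97, 116, 117, 114, 101],
   [66, 114, 97, 118, 101, 32, 78, 97, 116, 117, 114, 101],
   [66, 111, 108, 100, 32, 78, 97, 116, 117, 114, 101],
   [67, 97, 108, 109, 32, 78, 97, 116, 117, 114, 101],
   [67, 97, 114, 101, 102, 117, 108, 32, 78, 97, 116, 117, 114, 101],
   [68, 111, 99, 105, 108, 101, 32, 78, 97, 116, 117, 114, 101],
   [71, 101, 110, 116, 108, 101, 32, 78, 97, 116, 117, 114, 101],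
   [72, 97, 114, 100, 121, 32, 78, 97, 116, 117, 114, 101],
   [72, 97, 115, 116, 121, 32, 78, 97, 116, 117, 114, 101],
   [73, 109, 112, 105, 115, 104, 32, 78, 97, 116, 117, 114, 101],
   [74, 111, 108, 108, 121, 32, 78, 97, 116, 117, 114, 101],
   [76, 97, 120, 32, 78, 97, 116, 117, 114, 101],
   [76, 111, 110, 101, 108, 121, 32, 78, 97, 116, 117, 114, 101],
   [77, 105, 108, 100, 32, 78, 97, 116, 117, 114, 101],
   [77, 111, 100, 101, 115, 116, 32, 78, 97, 116, 117, 114, 101],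
   [78, 97, 105, 118, 101, 32, 78, 97, 116, 117, 114, 101],
   [78, 97, 117, 103, 104, 116, 121, 32, 78, 97, 116, 117, 114, 101],
   [81, 117, 105, 101, 116, 32, 78, 97, 116, 117, 114, 101],
   [81, 117, 105, 114, 107, 121, 32, 78, 97, 116, 117, 114, 101],
   [82, 97, 115, 104, 32, 78, 97, 116, 117, 114, 101],
   [82, 101, 108, 97, 120, 101, 100, 32, 78, 97, 116, 117, 114, 101],
   [83, 97, 115, 115, 121, 32, 78, 97, 116, 117, 114, 101],
   [83, 101, 114, 105, 111, 117, 115, 32, 78, 97, 116, 117, 114, 101],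
   [84, 105, 109, 105, 100, 32, 78, 97, 116, 117, 114, 101],
   [42]]


def goodN (ts : List (List Nat)) : Prop :=
  ts.Nodup ∧
  (∀ t ∈ ts, t ≠ [] ∧ (10 : Nat) ∉ t) ∧
  (∀ t1 ∈ ts, ∀ t2 ∈ ts,
    (t1 ≠ t2 → ¬ t1 <+: t2) ∧
    (∀ k ∈ List.range t1.length, k ≠ 0 → ¬ t2 <+: t1.drop k ∧ ¬ t1.drop k <+: t2))

lemma tokF_0 : List.map Char.toNat (String.toList "Ability:") = [65, 98, 105, 108, 105, 116, 121, 58] := by decide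
lemma tokF_1 : List.map Char.toNat (String.toList "EVs:") = [69, 86, 115, 58] := by decide
lemma tokF_2 : List.map Char.toNat (String.toList "IVs:") = [73, 86, 115, 58] := by decide
lemma tokF_3 : List.map Char.toNat (String.toList "Shiny:") = [83, 104, 105, 110, 121, 58] := by decide
lemma tokF_4 : List.map Char.toNat (String.toList "Gigantamax:") = [71, 105, 103, 97, 110, 116, 97, 109, 97, 120, 58] := by decide
lemma tokF_5 : List.map Char.toNat (String.toList "Ball:") = [66, 97, 108, 108, 58] := by decide
lemma tokF_6 : List.map Char.toNat (String.toList "- ") = [45, 32] := by decide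
lemma tokF_7 : List.map Char.toNat (String.toList "Level:") = [76, 101, 118, 101, 108, 58] := by decide
lemma tokF_8 : List.map Char.toNat (String.toList "Happiness:") = [72, 97, 112, 112, 105, 110, 101, 115, 115, 58] := by decide
lemma tokF_9 : List.map Char.toNat (String.toList "Language:") = [76, 97, 110, 103, 117, 97, 103, 101, 58] := by decide
lemma tokF_10 : List.map Char.toNat (String.toList "OT:") = [79, 84, 58] := by decide
lemma tokF_11 : List.map Char.toNat (String.toList "OTGender:") = [79, 84, 71, 101, 110, 100, 101, 114, 58] := by decide
lemma tokF_12 : List.map Char.toNat (String.toList "TID:") = [84, 73, 68, 58] := by decide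
lemma tokF_13 : List.map Char.toNat (String.toList "SID:") = [83, 73, 68, 58] := by decide
lemma tokF_14 : List.map Char.toNat (String.toList "Alpha:") = [65, 108, 112, 104, 97, 58] := by decide
lemma tokF_15 : List.map Char.toNat (String.toList "Tera Type:") = [84, 101, 114, 97, 32, 84, 121, 112, 101, 58] := by decide
lemma tokN_0 : List.map Char.toNat (String.toList ("Adamant" ++ " Nature")) = [65, 100, 97, 109, 97, 110, 116, 32, 78, 97, 116, 117, 114, 101] := by decide
lemma tokN_1 : List.map Char.toNat (String.toList ("Bashful" ++ " Nature")) = [66, 97, 115, 104, 102, 117, 108, 32, 78, 97, 116, 117, 114, 101] := by decide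
lemma tokN_2 : List.map Char.toNat (String.toList ("Brave" ++ " Nature")) = [66, 114, 97, 118, 101, 32, 78, 97, 116, 117, 114, 101] := by decide
lemma tokN_3 : List.map Char.toNat (String.toList ("Bold" ++ " Nature")) = [66, 111, 108, 100, 32, 78, 97, 116, 117, 114, 101] := by decide
lemma tokN_4 : List.map Char.toNat (String.toList ("Calm" ++ " Nature")) = [67, 97, 108, 109, 32, 78, 97, 116, 117, 114, 101] := by decide
lemma tokN_5 : List.map Char.toNat (String.toList ("Careful" ++ " Nature")) = [67, 97, 114, 101, 102, 117, 108, 32, 78, 97, 116, 117, 114, 101] := by decide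
lemma tokN_6 : List.map Char.toNat (String.toList ("Docile" ++ " Nature")) = [68, 111, 99, 105, 108, 101, 32, 78, 97, 116, 117, 114, 101] := by decide
lemma tokN_7 : List.map Char.toNat (String.toList ("Gentle" ++ " Nature")) = [71, 101, 110, 116, 108, 101, 32, 78, 97, 116, 117, 114, 101] := by decide
lemma tokN_8 : List.map Char.toNat (String.toList ("Hardy" ++ " Nature")) = [72, 97, 114, 100, 121, 32, 78, 97, 116, 117, 114, 101] := by decide
lemma tokN_9 : List.map Char.toNat (String.toList ("Hasty" ++ " Nature")) = [72, 97, 115, 116, 121, 32, 78, 97, 116, 117, 114, 101] := by decide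
lemma tokN_10 : List.map Char.toNat (String.toList ("Impish" ++ " Nature")) = [73, 109, 112, 105, 115, 104, 32, 78, 97, 116, 117, 114, 101] := by decide
lemma tokN_11 : List.map Char.toNat (String.toList ("Jolly" ++ " Nature")) = [74, 111, 108, 108, 121, 32, 78, 97, 116, 117, 114, 101] := by decide
lemma tokN_12 : List.map Char.toNat (String.toList ("Lax" ++ " Nature")) = [76, 97, 120, 32, 78, 97, 116, 117, 114, 101] := by decide
lemma tokN_13 : List.map Char.toNat (String.toList ("Lonely" ++ " Nature")) = [76, 111, 110, 101, 108, 121, 32, 78, 97, 116, 117, 114, 101] := by decide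
lemma tokN_14 : List.map Char.toNat (String.toList ("Mild" ++ " Nature")) = [77, 105, 108, 100, 32, 78, 97, 116, 117, 114, 101] := by decide
lemma tokN_15 : List.map Char.toNat (String.toList ("Modest" ++ " Nature")) = [77, 111, 100, 101, 115, 116, 32, 78, 97, 116, 117, 114, 101] := by decide
lemma tokN_16 : List.map Char.toNat (String.toList ("Naive" ++ " Nature")) = [78, 97, 105, 118, 101, 32, 78, 97, 116, 117, 114, 101] := by decide
lemma tokN_17 : List.map Char.toNat (String.toList ("Naughty" ++ " Nature")) = [78, 97, 117, 103, 104, 116, 121, 32, 78, 97, 116, 117, 114, 101] := by decide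
lemma tokN_18 : List.map Char.toNat (String.toList ("Quiet" ++ " Nature")) = [81, 117, 105, 101, 116, 32, 78, 97, 116, 117, 114, 101] := by decide
lemma tokN_19 : List.map Char.toNat (String.toList ("Quirky" ++ " Nature")) = [81, 117, 105, 114, 107, 121, 32, 78, 97, 116, 117, 114, 101] := by decide
lemma tokN_20 : List.map Char.toNat (String.toList ("Rash" ++ " Nature")) = [82, 97, 115, 104, 32, 78, 97, 116, 117, 114, 101] := by decide
lemma tokN_21 : List.map Char.toNat (String.toList ("Relaxed" ++ " Nature")) = [82, 101, 108, 97, 120, 101, 100, 32, 78, 97, 116, 117, 114, 101] := by decide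
lemma tokN_22 : List.map Char.toNat (String.toList ("Sassy" ++ " Nature")) = [83, 97, 115, 115, 121, 32, 78, 97, 116, 117, 114, 101] := by decide
lemma tokN_23 : List.map Char.toNat (String.toList ("Serious" ++ " Nature")) = [83, 101, 114, 105, 111, 117, 115, 32, 78, 97, 116, 117, 114, 101] := by decide
lemma tokN_24 : List.map Char.toNat (String.toList ("Timid" ++ " Nature")) = [84, 105, 109, 105, 100, 32, 78, 97, 116, 117, 114, 101] := by decide
lemma tokStar : '*'.toNat = 42 := by decide

lemma codes_eq : tokensB.map (List.map Char.toNat) = tokensN := by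
  simp only [tokensB, fieldTokensB, naturesB, tokensN,
    List.map_cons, List.map_nil, List.cons_append, List.nil_append,
    tokF_0, tokF_1, tokF_2, tokF_3, tokF_4, tokF_5, tokF_6, tokF_7, tokF_8, tokF_9, tokF_10, tokF_11, tokF_12, tokF_13, tokF_14, tokF_15, tokN_0, tokN_1, tokN_2, tokN_3, tokN_4, tokN_5, tokN_6, tokN_7, tokN_8, tokN_9, tokN_10, tokN_11, tokN_12, tokN_13, tokN_14, tokN_15, tokN_16, tokN_17, tokN_18, tokN_19, tokN_20, tokN_21, tokN_22, tokN_23, tokN_24, tokStar]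

lemma splittables_eq :
    splittables = fieldTokensB ++ naturesB.map (fun n => n ++ " Nature") ++ ["*"] := by decide

lemma star_toList : "*".toList = ['*'] := by decide

-- B's token list is (as a list of char lists) exactly A's token list
lemma tokensB_eq : splittables.map String.toList = tokensB := by
  rw [splittables_eq]
  simp only [tokensB, List.map_append, List.map_map, List.map_cons, List.map_nil,
    Function.comp_def, star_toList]

lemma cn_inj : Function.Injective Char.toNat := fun _ _ h => Char.ext (UInt32.toNat_inj.mp h)

lemma good_of_codes (ts : List (List Char)) (h : goodN (ts.map (List.map Char.toNat))) :
    good ts := by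
  obtain ⟨h1, h2, h3⟩ := h
  refine ⟨List.Nodup.of_map _ h1, ?_, ?_⟩
  · intro t ht
    obtain ⟨hne, hnl⟩ := h2 (t.map Char.toNat) (List.mem_map_of_mem ht)
    refine ⟨fun he => hne (by simp [he]), fun hm => hnl ?_⟩
    have h10 : ('\n').toNat = 10 := by decide
    simpa [h10] using List.mem_map_of_mem (f := Char.toNat) hm
  · intro t1 ht1 t2 ht2
    obtain ⟨ha, hb⟩ := h3 (t1.map Char.toNat) (List.mem_map_of_mem ht1)
      (t2.map Char.toNat) (List.mem_map_of_mem ht2)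
    constructor
    · intro hne hp
      exact ha (fun he => hne (List.map_injective_iff.mpr cn_inj he)) (hp.map _)
    · intro k hk hk0
      obtain ⟨c1, c2⟩ := hb k (by simpa using hk) hk0
      constructor
      · intro hp
        exact c1 (by rw [← List.map_drop]; exact hp.map _)
      · intro hp
        exact c2 (by rw [← List.map_drop] at c2 ⊢; exact hp.map _)

set_option maxHeartbeats 1000000 in
lemma goodN_tokensN : goodN tokensN := by unfold goodN; decide

lemma good_tokensB : good tokensB := good_of_codes tokensB (codes_eq ▸ goodN_tokensN)

lemma bridge1 (l : List String) (s : String) :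
    (l.foldl (fun s i => if PySem.Str.isIn i s then PySem.Str.replace s i ("\n" ++ i) else s) s).toList
      = (l.map String.toList).foldl stepA s.toList := by
  induction l generalizing s with
  | nil => rfl
  | cons i l ih =>
    simp only [List.foldl_cons, List.map_cons]
    rw [ih]
    congr 1
    unfold stepA
    have hin : PySem.Str.isIn i s = PySem.Chars.isIn i.toList s.toList := rfl
    by_cases h : PySem.Chars.isIn i.toList s.toList
    · rw [hin] at *
      rw [if_pos h, if_pos h]
      show (PySem.Str.replace s i ("\n" ++ i)).toList = _
      unfold PySem.Str.replace
      rw [String.toList_ofList]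
      congr 1
      rw [String.toList_append]
      rfl
    · rw [hin] at *
      rw [if_neg h, if_neg h]

-- ===== VERDICT (by name: the statement is the Claim_ definition above) =====
theorem FormatedSetDetails_spec : Claim_equal_FormatedSetDetails := by
  intro s _
  unfold Spec_FormatedSetDetails
  have h1 : (FormatedSetDetails s).toList = scan tokensB s.toList := by
    unfold FormatedSetDetails
    rw [bridge1 splittables s, tokensB_eq]
    exact chain tokensB good_tokensB s.toList
  calc FormatedSetDetails s
      = String.ofList (FormatedSetDetails s).toList := (String.ofList_toList).symm
    _ = String.ofList (scan tokensB s.toList) := by rw [h1]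
    _ = FormatedSetDetails_alt s := rfl
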